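-- pv_equiv track=rewrite | github.com/harald-holden-4ss/analyses-store | app/services/analysis_dict_manipulator.py | _update_summary_value_list
-- ===== SOURCE A (Python) =====
-- def _update_summary_value_list(summary_value_list, method, value):
--     existing_methods = list(set([c["method"] for c in summary_value_list]))
--     if method in existing_methods:
--         one_value = [c for c in summary_value_list if c["method"] == method][0]
--         one_value_index = summary_value_list.index(one_value)
--         summary_value_list[one_value_index] = {"method": method, "value": value}
--         return summary_value_list
--     else:
--         summary_value_list.append({"method": method, "value": value})
--         return summary_value_list
-- ===== SOURCE B (Python) =====
-- def _update_summary_value_list(summary_value_list, method, value):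
--     for i, c in enumerate(summary_value_list):
--         if c["method"] == method:
--             summary_value_list[i] = {"method": method, "value": value}
--             return summary_value_list
--     summary_value_list.append({"method": method, "value": value})
--     return summary_value_list
-- ===== Notes on version B (the rewrite author's own statement) =====
-- stated objective: simpler
-- what changed: Replaces A's three passes (set of all methods, filter comprehension, list.index) with a single enumerate loop that replaces the first matching entry in place or appends if none matches.
import Mathlib
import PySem

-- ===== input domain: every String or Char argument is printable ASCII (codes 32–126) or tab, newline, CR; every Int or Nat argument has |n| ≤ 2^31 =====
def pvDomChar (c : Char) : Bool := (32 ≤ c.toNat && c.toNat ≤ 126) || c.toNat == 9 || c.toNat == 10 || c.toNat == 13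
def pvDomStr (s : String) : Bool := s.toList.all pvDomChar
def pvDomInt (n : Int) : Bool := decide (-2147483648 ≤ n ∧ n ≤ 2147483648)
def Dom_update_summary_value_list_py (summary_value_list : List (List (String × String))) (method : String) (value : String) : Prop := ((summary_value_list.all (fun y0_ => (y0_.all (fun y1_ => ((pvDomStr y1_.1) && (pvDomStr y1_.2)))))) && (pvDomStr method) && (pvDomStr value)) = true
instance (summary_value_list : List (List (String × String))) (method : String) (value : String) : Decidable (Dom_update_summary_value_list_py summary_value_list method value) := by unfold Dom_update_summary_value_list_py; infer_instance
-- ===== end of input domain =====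

-- B replaces A's three passes (set of methods / filter / list.index) by ONE scan that rewrites the
-- first matching entry or appends; simpler, same result. Both A and B mutate the list in place in
-- Python; the equivalence proved here is about the returned value (B performs the same mutation).

-- ===== PORT A =====
-- c["method"] is ported as first-match association lookup (exact for dicts, whose key lists are
-- nodup by Pre_); the default "" is never hit inside Pre_ (every entry has a "method" key).
def update_summary_value_list_py (summary_value_list : List (List (String × String))) (method : String) (value : String) : List (List (String × String)) :=
  let existing_methods : PySem.Set String :=
    PySem.Set.ofList (summary_value_list.map (fun c => (((c.find? (fun p => p.1 == "method")).map Prod.snd).getD "")))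
  if PySem.Set.contains existing_methods method then
    match (summary_value_list.filter (fun c => (((c.find? (fun p => p.1 == "method")).map Prod.snd).getD "") == method)).head? with
    | some one_value =>
      match PySem.List.index? summary_value_list one_value with
      | some one_value_index => summary_value_list.set one_value_index [("method", method), ("value", value)]
      | none => summary_value_list
    | none => summary_value_list
  else
    summary_value_list ++ [[("method", method), ("value", value)]]

-- ===== PORT B =====
def update_summary_value_list_py_alt (summary_value_list : List (List (String × String))) (method : String) (value : String) : List (List (String × String)) :=
  match summary_value_list with
  | [] => [[("method", method), ("value", value)]]
  | c :: rest =>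
    if (((c.find? (fun p => p.1 == "method")).map Prod.snd).getD "") == method then
      [("method", method), ("value", value)] :: rest
    else
      c :: update_summary_value_list_py_alt rest method value

-- ===== PRECONDITION & SPEC =====
-- Pre_ excludes inputs where some entry has no "method" key (Python A raises KeyError there) and
-- entries whose association list has duplicate keys (not the image of any Python dict).
def Pre_update_summary_value_list_py (summary_value_list : List (List (String × String))) (method : String) (value : String) : Prop :=
  ∀ c ∈ summary_value_list, (∃ p ∈ c, p.1 = "method") ∧ (c.map Prod.fst).Nodup
instance (summary_value_list : List (List (String × String))) (method : String) (value : String) : Decidable (Pre_update_summary_value_list_py summary_value_list method value) := by unfold Pre_update_summary_value_list_py; infer_instance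
def pvWitness_update_summary_value_list_py : (List (List (String × String))) × String × String :=
  ([[("method", "a"), ("value", "1")]], "a", "2")

def Spec_update_summary_value_list_py (summary_value_list : List (List (String × String))) (method : String) (value : String) (out : List (List (String × String))) : Prop := out = update_summary_value_list_py_alt summary_value_list method value
instance (summary_value_list : List (List (String × String))) (method : String) (value : String) (out : List (List (String × String))) : Decidable (Spec_update_summary_value_list_py summary_value_list method value out) := by unfold Spec_update_summary_value_list_py; infer_instance

-- ===== CLAIM (what is proved, stated in full; the proofs are below) =====
def Claim_equal_update_summary_value_list_py : Prop := ∀ (summary_value_list : List (List (String × String))) (method : String) (value : String), Dom_update_summary_value_list_py summary_value_list method value → Pre_update_summary_value_list_py summary_value_list method value → Spec_update_summary_value_list_py summary_value_list method value (update_summary_value_list_py summary_value_list method value)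

-- ===== LEMMAS AND PROOFS =====

theorem update_summary_value_list_py_eq_alt (svl : List (List (String × String))) (m v : String) : update_summary_value_list_py svl m v = update_summary_value_list_py_alt svl m v := by
  induction svl with
  | nil => rfl
  | cons c rest ih =>
    by_cases hc : (((c.find? (fun p => p.1 == "method")).map Prod.snd).getD "") = m
    · have hcont : PySem.Set.contains (PySem.Set.ofList ((c :: rest).map (fun c => (((c.find? (fun p => p.1 == "method")).map Prod.snd).getD "")))) m = true := by
        rw [PySem.Set.contains_iff, PySem.Set.mem_ofList]
        exact List.mem_map.mpr ⟨c, List.mem_cons_self, hc⟩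
      have hfil : List.filter (fun c => (((c.find? (fun p => p.1 == "method")).map Prod.snd).getD "") == m) (c :: rest)
          = c :: List.filter (fun c => (((c.find? (fun p => p.1 == "method")).map Prod.snd).getD "") == m) rest :=
        List.filter_cons_of_pos (by simpa using hc)
      have hidx : PySem.List.index? (c :: rest) c = some 0 := PySem.List.index?_cons_self c rest
      simp only [update_summary_value_list_py, update_summary_value_list_py_alt, hcont, hfil, hidx, if_true, List.head?_cons, List.set]
      simp [hc]
    · have hcb : ((((c.find? (fun p => p.1 == "method")).map Prod.snd).getD "") == m) = false := by
        simpa using hc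
      have hfil : List.filter (fun c => (((c.find? (fun p => p.1 == "method")).map Prod.snd).getD "") == m) (c :: rest)
          = List.filter (fun c => (((c.find? (fun p => p.1 == "method")).map Prod.snd).getD "") == m) rest :=
        List.filter_cons_of_neg (by simpa using hc)
      by_cases hm : m ∈ rest.map (fun c => (((c.find? (fun p => p.1 == "method")).map Prod.snd).getD ""))
      · have hcont : PySem.Set.contains (PySem.Set.ofList ((c :: rest).map (fun c => (((c.find? (fun p => p.1 == "method")).map Prod.snd).getD "")))) m = true := by
          rw [PySem.Set.contains_iff, PySem.Set.mem_ofList]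
          simp only [List.map_cons, List.mem_cons]
          exact Or.inr hm
        have hcontR : PySem.Set.contains (PySem.Set.ofList (rest.map (fun c => (((c.find? (fun p => p.1 == "method")).map Prod.snd).getD "")))) m = true := by
          rw [PySem.Set.contains_iff, PySem.Set.mem_ofList]; exact hm
        obtain ⟨x, hxmem, hfx⟩ := List.mem_map.mp hm
        have hxfil : x ∈ List.filter (fun c => (((c.find? (fun p => p.1 == "method")).map Prod.snd).getD "") == m) rest :=
          List.mem_filter.mpr ⟨hxmem, by simpa using hfx⟩
        obtain ⟨ov, hov⟩ : ∃ ov, (List.filter (fun c => (((c.find? (fun p => p.1 == "method")).map Prod.snd).getD "") == m) rest).head? = some ov := by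
          cases hE : (List.filter (fun c => (((c.find? (fun p => p.1 == "method")).map Prod.snd).getD "") == m) rest).head? with
          | none => rw [List.head?_eq_none_iff] at hE; rw [hE] at hxfil; cases hxfil
          | some ov => exact ⟨ov, rfl⟩
        have hovfil : ov ∈ List.filter (fun c => (((c.find? (fun p => p.1 == "method")).map Prod.snd).getD "") == m) rest :=
          List.mem_of_mem_head? hov
        have hovmem : ov ∈ rest := (List.mem_filter.mp hovfil).1
        have hovm : (((ov.find? (fun p => p.1 == "method")).map Prod.snd).getD "") = m := by
          have := (List.mem_filter.mp hovfil).2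
          simpa using this
        have hcov : c ≠ ov := fun h => hc (h ▸ hovm)
        obtain ⟨j, hj⟩ : ∃ j, PySem.List.index? rest ov = some j := by
          have := PySem.List.index?_isSome_iff (xs := rest) (v := ov)
          rcases hE : PySem.List.index? rest ov with _ | j
          · rw [hE] at this; simp at this; exact absurd hovmem this
          · exact ⟨j, rfl⟩
        have hidx : PySem.List.index? (c :: rest) ov = some (j + 1) := by
          rw [PySem.List.index?_cons_of_ne rest hcov, hj]; rfl
        have ihr : rest.set j [("method", m), ("value", v)] = update_summary_value_list_py_alt rest m v := by
          rw [← ih]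
          simp only [update_summary_value_list_py, hcontR, hov, hj, if_true]
        simp only [update_summary_value_list_py, update_summary_value_list_py_alt, hcont, hfil, hov, hidx, if_true, hcb, Bool.false_eq_true, if_false, List.set]
        exact congrArg (c :: ·) ihr
      · have hcont : PySem.Set.contains (PySem.Set.ofList ((c :: rest).map (fun c => (((c.find? (fun p => p.1 == "method")).map Prod.snd).getD "")))) m = false := by
          rw [Bool.eq_false_iff]
          intro h
          rw [PySem.Set.contains_iff, PySem.Set.mem_ofList] at h
          simp only [List.map_cons, List.mem_cons] at h
          rcases h with h | h
          · exact hc h.symm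
          · exact hm h
        have hcontR : PySem.Set.contains (PySem.Set.ofList (rest.map (fun c => (((c.find? (fun p => p.1 == "method")).map Prod.snd).getD "")))) m = false := by
          rw [Bool.eq_false_iff]
          intro h
          rw [PySem.Set.contains_iff, PySem.Set.mem_ofList] at h
          exact hm h
        have ihr : rest ++ [[("method", m), ("value", v)]] = update_summary_value_list_py_alt rest m v := by
          rw [← ih]
          simp only [update_summary_value_list_py, hcontR, Bool.false_eq_true, if_false]
        simp only [update_summary_value_list_py, update_summary_value_list_py_alt, hcont, hcb, Bool.false_eq_true, if_false, List.cons_append]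
        exact congrArg (c :: ·) ihr

-- ===== VERDICT (by name: the statement is the Claim_ definition above) =====
theorem update_summary_value_list_py_spec : Claim_equal_update_summary_value_list_py := by
  intro svl m v _ _
  exact update_summary_value_list_py_eq_alt svl m v
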